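-- pv_equiv track=rewrite | github.com/cuulee/ult | ult/squares_index.py | constructx_fromlines
-- ===== SOURCE A (Python) =====
-- def constructx_fromlines(x1,x2):
-- 	likelist = []
-- 	if len(x1) > len(x2):
-- 		for row in x1:
-- 			oldrow = row
-- 			for row in x2:
-- 				if oldrow == row:
-- 					likelist.append(row)
-- 	elif len(x1) <= len(x2):
-- 		for row in x2:
-- 			oldrow = row
-- 			for row in x1:
-- 				if oldrow == row:
-- 					likelist.append(row)
--
-- 	return likelist
-- ===== SOURCE B (Python) =====
-- def constructx_fromlines(x1, x2):
--     big, small = (x1, x2) if len(x1) > len(x2) else (x2, x1)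
--     pos = {}
--     for i, v in enumerate(big):
--         pos.setdefault(v, []).append(i)
--     idxs = []
--     for w in small:
--         idxs.extend(pos.get(w, []))
--     idxs.sort()
--     return [big[i] for i in idxs]
-- ===== Notes on version B (the rewrite author's own statement) =====
-- stated objective: alternative
-- what changed: Instead of A's nested per-element scans (or a count-and-emit pass), B builds an inverted index of the larger list mapping each value to its positions, gathers those position lists while scanning the SMALLER list, sorts the gathered indices to restore the larger list's order, and reads the values back by indexing; O(n+m+K log K) with K the output size.
import Mathlib
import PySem

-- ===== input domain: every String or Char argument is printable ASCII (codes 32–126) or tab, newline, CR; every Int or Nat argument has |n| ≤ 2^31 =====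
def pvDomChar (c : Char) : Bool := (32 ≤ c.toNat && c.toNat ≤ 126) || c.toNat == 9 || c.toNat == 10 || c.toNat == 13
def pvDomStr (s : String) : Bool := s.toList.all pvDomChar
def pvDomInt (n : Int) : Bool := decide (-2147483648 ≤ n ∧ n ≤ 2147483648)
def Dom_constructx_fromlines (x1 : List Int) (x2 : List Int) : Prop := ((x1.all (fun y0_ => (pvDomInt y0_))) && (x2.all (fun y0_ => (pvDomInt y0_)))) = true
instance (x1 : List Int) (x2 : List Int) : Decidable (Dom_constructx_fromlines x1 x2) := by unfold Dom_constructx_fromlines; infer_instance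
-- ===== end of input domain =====

-- B replaces A's nested equality scans by an inverted index of the larger list (value -> positions),
-- a gather pass over the smaller list, and a sort of the gathered indices restoring the larger list's order.

-- ===== PORT A =====
def constructx_fromlines (x1 : List Int) (x2 : List Int) : List Int :=
  if x1.length > x2.length then
    x1.foldl (fun likelist oldrow =>
      x2.foldl (fun acc row => if oldrow == row then acc ++ [row] else acc) likelist) []
  else
    x2.foldl (fun likelist oldrow =>
      x1.foldl (fun acc row => if oldrow == row then acc ++ [row] else acc) likelist) []

-- ===== PORT B =====
-- Source B's `[big[i] for i in idxs]` is ported with pyGetD: every gathered i comes from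
-- enumerate(big), so it is a nonnegative in-range index and pyGetD is exact there.
def constructx_fromlines_alt (x1 : List Int) (x2 : List Int) : List Int :=
  let bs : List Int × List Int := if x1.length > x2.length then (x1, x2) else (x2, x1)
  let pos : PySem.Dict Int (List Int) :=
    (PySem.List.enumerate bs.1).foldl
      (fun d p => d.insert p.2 (d.getD p.2 [] ++ [p.1])) PySem.Dict.empty
  let idxs : List Int := bs.2.foldl (fun acc w => acc ++ pos.getD w []) []
  (PySem.List.sorted idxs (fun i => i) false).map (fun i => PySem.List.pyGetD bs.1 i 0)

-- ===== PRECONDITION & SPEC =====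
def Spec_constructx_fromlines (x1 : List Int) (x2 : List Int) (out : List Int) : Prop := out = constructx_fromlines_alt x1 x2
instance (x1 : List Int) (x2 : List Int) (out : List Int) : Decidable (Spec_constructx_fromlines x1 x2 out) := by unfold Spec_constructx_fromlines; infer_instance

-- ===== CLAIM (what is proved, stated in full; the proofs are below) =====
def Claim_equal_constructx_fromlines : Prop := ∀ (x1 : List Int) (x2 : List Int), Dom_constructx_fromlines x1 x2 → Spec_constructx_fromlines x1 x2 (constructx_fromlines x1 x2)

-- ===== LEMMAS AND PROOFS =====

-- Canonical value both sides are reduced to: for each element of `big`, in order,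
-- one copy per occurrence in `small`.
def pvCanon (big small : List Int) : List Int :=
  big.flatMap (fun v => List.replicate (small.count v) v)

-- ---- A side ----
lemma inner_fold (row : Int) : ∀ (small : List Int) (acc : List Int),
    small.foldl (fun a r => if row = r then a ++ [r] else a) acc
      = acc ++ List.replicate (small.count row) row := by
  intro small
  induction small with
  | nil => intro acc; simp
  | cons r rs ih =>
    intro acc
    simp only [List.foldl_cons, List.count_cons]
    by_cases h : row = r
    · subst h
      rw [if_pos rfl, ih]
      simp [List.replicate_succ]
    · simp only [if_neg h]
      rw [ih]
      have hr : r ≠ row := Ne.symm h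
      simp [hr]

lemma outer_fold (small : List Int) : ∀ (big acc : List Int),
    big.foldl (fun likelist oldrow =>
        small.foldl (fun a r => if oldrow = r then a ++ [r] else a) likelist) acc
      = acc ++ pvCanon big small := by
  intro big
  induction big with
  | nil => intro acc; simp [pvCanon]
  | cons b bs ih =>
    intro acc
    rw [List.foldl_cons, ih, inner_fold]
    simp [pvCanon, List.append_assoc]

-- ---- B side ----

-- positions dict: generic characterisation of the building fold
lemma pos_fold (w : Int) : ∀ (ps : List (Int × Int)) (d : PySem.Dict Int (List Int)),
    (ps.foldl (fun d p => d.insert p.2 (d.getD p.2 [] ++ [p.1])) d).getD w []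
      = d.getD w [] ++ (ps.filter (fun p => p.2 = w)).map (·.1) := by
  intro ps
  induction ps with
  | nil => intro d; simp
  | cons p rest ih =>
    intro d
    rw [List.foldl_cons, ih]
    by_cases h : w = p.2
    · simp [h.symm]
    · have h' : ¬ (p.2 = w) := fun e => h e.symm
      simp [h', PySem.Dict.getD_insert, h]

-- gathering fold = flatMap
lemma gather_fold (pos : PySem.Dict Int (List Int)) : ∀ (small acc : List Int),
    small.foldl (fun acc w => acc ++ pos.getD w []) acc
      = acc ++ small.flatMap (fun w => pos.getD w []) := by
  intro small
  induction small with
  | nil => intro acc; simp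
  | cons w ws ih => intro acc; rw [List.foldl_cons, ih]; simp

lemma flatMap_append_perm {α β : Type} (f g : α → List β) : ∀ (l : List α),
    (l.flatMap (fun x => f x ++ g x)).Perm (l.flatMap f ++ l.flatMap g) := by
  intro l
  induction l with
  | nil => simp
  | cons a t ih =>
    simp only [List.flatMap_cons, List.append_assoc]
    refine List.Perm.append_left (f a) ?_
    exact (ih.append_left (g a)).trans (List.perm_append_comm_assoc _ _ _)

lemma flatMap_ite_single {α β : Type} (c : α → Prop) [DecidablePred c] (f : α → β) :
    ∀ (l : List α),
    l.flatMap (fun x => if c x then [f x] else []) = (l.filter (fun x => decide (c x))).map f := by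
  intro l
  induction l with
  | nil => simp
  | cons a t ih =>
    by_cases h : c a <;> simp [h, ih]

-- the gathered index list is a permutation of the canonical (sorted) index list
lemma gather_perm (enum : List (Int × Int)) : ∀ (small : List Int),
    (small.flatMap (fun w => (enum.filter (fun p => p.2 = w)).map (·.1))).Perm
      (enum.flatMap (fun p => List.replicate (small.count p.2) p.1)) := by
  intro small
  induction small with
  | nil => simp
  | cons w ws ih =>
    simp only [List.flatMap_cons]
    have hsplit : enum.flatMap (fun p => List.replicate ((w :: ws).count p.2) p.1)
        = enum.flatMap (fun p =>
            List.replicate (ws.count p.2) p.1 ++ (if p.2 = w then [p.1] else [])) := by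
      refine List.flatMap_congr (fun p _ => ?_)
      by_cases h : p.2 = w
      · simp [h, List.replicate_succ']
      · have h2 : ¬ w = p.2 := fun e => h e.symm
        simp [h, h2]
    rw [hsplit]
    refine List.Perm.trans ?_ (flatMap_append_perm _ _ enum).symm
    rw [flatMap_ite_single (fun p : Int × Int => p.2 = w) (·.1) enum]
    exact (ih.append_left _).trans List.perm_append_comm

-- the canonical index list is sorted (indices of enumerate are strictly increasing)
lemma canon_idx_sorted (k : Int → Nat) : ∀ (enum : List (Int × Int)),
    enum.Pairwise (fun p q => p.1 < q.1) →
    (enum.flatMap (fun p => List.replicate (k p.2) p.1)).Pairwise (· ≤ ·) := by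
  intro enum
  induction enum with
  | nil => intro _; simp
  | cons p rest ih =>
    intro hpw
    rw [List.pairwise_cons] at hpw
    simp only [List.flatMap_cons]
    rw [List.pairwise_append]
    refine ⟨List.pairwise_replicate.2 (Or.inr le_rfl), ih hpw.2, ?_⟩
    intro x hx y hy
    have hx' : x = p.1 := List.eq_of_mem_replicate hx
    rw [List.mem_flatMap] at hy
    obtain ⟨q, hq, hyq⟩ := hy
    have hy' : y = q.1 := List.eq_of_mem_replicate hyq
    rw [hx', hy']
    exact le_of_lt (hpw.1 q hq)

-- reading the values back: mapping big[i] over the canonical index list gives pvCanon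
lemma canon_map (big small : List Int) :
    ((PySem.List.enumerate big).flatMap
        (fun p => List.replicate (small.count p.2) p.1)).map (fun i => PySem.List.pyGetD big i 0)
      = pvCanon big small := by
  rw [List.map_flatMap]
  have h1 : ∀ p ∈ PySem.List.enumerate big,
      (List.replicate (small.count p.2) p.1).map (fun i => PySem.List.pyGetD big i 0)
        = List.replicate (small.count p.2) p.2 := by
    intro p hp
    rw [PySem.List.mem_enumerate_iff] at hp
    obtain ⟨kk, hk, rfl⟩ := hp
    simp [List.map_replicate, PySem.List.pyGetD_natCast, List.getD_eq_getElem?_getD,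
      List.getElem?_eq_getElem hk]
  rw [List.flatMap_congr h1]
  have h2 : (PySem.List.enumerate big).flatMap (fun p => List.replicate (small.count p.2) p.2)
      = ((PySem.List.enumerate big).map (·.2)).flatMap (fun v => List.replicate (small.count v) v) := by
    rw [List.flatMap_map]
  rw [h2, PySem.List.map_snd_enumerate]
  rfl

-- B on a chosen (big, small) pair equals pvCanon
lemma alt_branch (big small : List Int) :
    (PySem.List.sorted
        (small.foldl (fun acc w =>
          acc ++ ((PySem.List.enumerate big).foldl
            (fun d p => d.insert p.2 (d.getD p.2 [] ++ [p.1])) PySem.Dict.empty).getD w []) [])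
        (fun i => i) false).map (fun i => PySem.List.pyGetD big i 0)
      = pvCanon big small := by
  have hpos : ∀ w, ((PySem.List.enumerate big).foldl
      (fun d p => d.insert p.2 (d.getD p.2 [] ++ [p.1])) PySem.Dict.empty).getD w []
        = ((PySem.List.enumerate big).filter (fun p => p.2 = w)).map (·.1) := by
    intro w; rw [pos_fold]; simp
  have hidxs : (small.foldl (fun acc w =>
      acc ++ ((PySem.List.enumerate big).foldl
        (fun d p => d.insert p.2 (d.getD p.2 [] ++ [p.1])) PySem.Dict.empty).getD w []) [])
        = small.flatMap (fun w => ((PySem.List.enumerate big).filter (fun p => p.2 = w)).map (·.1)) := by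
    rw [gather_fold]
    simp only [List.nil_append]
    exact List.flatMap_congr (fun w _ => hpos w)
  rw [hidxs]
  have hsorted : PySem.List.sorted
      (small.flatMap (fun w => ((PySem.List.enumerate big).filter (fun p => p.2 = w)).map (·.1)))
      (fun i => i) false
        = (PySem.List.enumerate big).flatMap (fun p => List.replicate (small.count p.2) p.1) := by
    apply PySem.List.sorted_id_eq_of_perm_of_pairwise
    · exact ((gather_perm (PySem.List.enumerate big) small)).symm
    · exact canon_idx_sorted (fun v => small.count v) _ (PySem.List.pairwise_lt_enumerate big 0)
  rw [hsorted, canon_map]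

-- ===== VERDICT (by name: the statement is the Claim_ definition above) =====
theorem constructx_fromlines_spec : Claim_equal_constructx_fromlines := by
  intro x1 x2 _
  unfold Spec_constructx_fromlines constructx_fromlines constructx_fromlines_alt
  by_cases h : x1.length > x2.length
  · simp only [if_pos h, beq_iff_eq]
    rw [outer_fold]
    simp only [List.nil_append]
    exact (alt_branch x1 x2).symm
  · simp only [if_neg h, beq_iff_eq]
    rw [outer_fold]
    simp only [List.nil_append]
    exact (alt_branch x2 x1).symm
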